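-- pv_equiv track=rewrite | github.com/chrisvire/ptx2pdf | python/lib/ptxprint/toc.py | fillEmpties
-- ===== SOURCE A (Python) =====
-- def fillEmpties(ttoc):
--     if len(ttoc):
--         tcols = [False] * len(ttoc[0])
--         for t in ttoc:
--             for i, e in enumerate(t):
--                 if len(e):
--                     tcols[i] = True
--         for t in ttoc:
--             for i, e in enumerate(t):
--                 if not len(e) and tcols[i]:
--                     t[i] = "\\kern-3pt"
--     return ttoc
-- ===== SOURCE B (Python) =====
-- def fillEmpties(ttoc):
--     if not ttoc:
--         return ttoc
--     for j in range(len(ttoc[0])):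
--         if any(len(t[j]) for t in ttoc if j < len(t)):
--             for t in ttoc:
--                 if j < len(t) and not len(t[j]):
--                     t[j] = "\\kern-3pt"
--     return ttoc
-- ===== Notes on version B (the rewrite author's own statement) =====
-- stated objective: alternative
-- what changed: B processes the table column-by-column in one fused pass per column (decide whether column j has any non-empty cell, then fill that column's empty cells immediately), instead of A's row-major two-phase scheme with a tcols marker array built over the whole grid and a second full grid re-scan.
import Mathlib
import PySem

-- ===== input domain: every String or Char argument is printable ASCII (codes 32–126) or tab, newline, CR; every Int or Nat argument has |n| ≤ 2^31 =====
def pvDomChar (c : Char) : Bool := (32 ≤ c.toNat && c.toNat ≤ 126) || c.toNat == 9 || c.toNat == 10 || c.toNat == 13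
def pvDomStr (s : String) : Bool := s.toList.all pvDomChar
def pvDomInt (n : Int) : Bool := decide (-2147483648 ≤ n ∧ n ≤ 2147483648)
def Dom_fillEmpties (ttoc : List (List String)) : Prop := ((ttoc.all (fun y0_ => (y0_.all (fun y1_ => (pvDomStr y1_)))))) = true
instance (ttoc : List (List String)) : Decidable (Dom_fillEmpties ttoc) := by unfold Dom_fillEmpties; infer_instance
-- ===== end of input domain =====

-- B processes the table column-by-column, deciding and filling each column in one fused pass, instead of A's
-- row-major marker-array build plus full second re-scan (objective: alternative, same asymptotic cost).
-- Both Pythons mutate ttoc in place and return it; the equivalence proved here is about the return value.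

-- ===== PORT A =====
-- first nested loop: tcols[i] = True for every non-empty cell.  tcols[i] raises IndexError for i ≥ len(tcols);
-- those inputs are excluded by Pre_fillEmpties, so the out-of-range case is made total by a no-op guard
-- (List.set is a no-op out of range); exact on Pre_.

def feaMark : List String → Nat → List Bool → List Bool
  | [], _, tc => tc
  | e :: es, i, tc => feaMark es (i + 1) (if PySem.Str.len e ≠ 0 then tc.set i true else tc)

-- second nested loop over one row: t[i] = "\kern-3pt" where the cell is empty and its column is marked.
-- tcols[i] is read with getD false; exact on Pre_ (in range there).

def feaFill (tc : List Bool) : List String → Nat → List String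
  | [], _ => []
  | e :: es, i =>
      (if PySem.Str.len e = 0 ∧ tc.getD i false = true then "\\kern-3pt" else e) :: feaFill tc es (i + 1)

def fillEmpties (ttoc : List (List String)) : List (List String) :=
  if ttoc.length ≠ 0 then
    let tcols := ttoc.foldl (fun tc t => feaMark t 0 tc) (List.replicate (ttoc.headD []).length false)
    ttoc.map (fun t => feaFill tcols t 0)
  else ttoc

-- ===== PORT B =====
-- for j in range(len(ttoc[0])): if any(len(t[j]) for t in ttoc if j < len(t)): fill column j's empty cells.

def fillEmpties_alt (ttoc : List (List String)) : List (List String) :=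
  if ttoc = [] then ttoc
  else
    (List.range (ttoc.headD []).length).foldl
      (fun acc j =>
        if ((acc.filter (fun t => decide (j < t.length))).map (fun t => t.getD j "")).any
             (fun e => PySem.Str.len e != 0) then
          acc.map (fun t =>
            if j < t.length ∧ PySem.Str.len (t.getD j "") = 0 then t.set j "\\kern-3pt" else t)
        else acc)
      ttoc

-- ===== PRECONDITION & SPEC =====
-- Pre_ excludes exactly the ragged tables with a row longer than the first row: on those A raises IndexError
-- (tcols is sized to len(ttoc[0]); the extra column index is hit either while marking or while reading tcols[i]),
-- so A returns on every input admitted here.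
def Pre_fillEmpties (ttoc : List (List String)) : Prop :=
  ∀ t ∈ ttoc, t.length ≤ (ttoc.headD []).length
instance (ttoc : List (List String)) : Decidable (Pre_fillEmpties ttoc) := by
  unfold Pre_fillEmpties; infer_instance
def pvWitness_fillEmpties : List (List String) := [["a", ""], ["", "b"]]

def Spec_fillEmpties (ttoc : List (List String)) (out : List (List String)) : Prop := out = fillEmpties_alt ttoc
instance (ttoc : List (List String)) (out : List (List String)) : Decidable (Spec_fillEmpties ttoc out) := by unfold Spec_fillEmpties; infer_instance

-- ===== CLAIM (what is proved, stated in full; the proofs are below) =====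
def Claim_equal_fillEmpties : Prop := ∀ (ttoc : List (List String)), Dom_fillEmpties ttoc → Pre_fillEmpties ttoc → Spec_fillEmpties ttoc (fillEmpties ttoc)

-- ===== LEMMAS AND PROOFS =====
-- the common model: a cell becomes "\kern-3pt" iff it is empty and predicate c holds of its column index.

def strNE (e : String) : Bool := PySem.Str.len e != 0

def colHit (t : List String) (i0 j : Nat) : Bool := decide (i0 ≤ j) && strNE (t.getD (j - i0) "")

def mRow (c : Nat → Bool) : List String → Nat → List String
  | [], _ => []
  | e :: es, i => (if !strNE e && c i then "\\kern-3pt" else e) :: mRow c es (i + 1)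

-- mRow restricted to column indices < m (= the state after B has processed columns 0..m-1)
def mRowLt (c : Nat → Bool) (m : Nat) : List String → Nat → List String
  | [], _ => []
  | e :: es, i => (if decide (i < m) && !strNE e && c i then "\\kern-3pt" else e) :: mRowLt c m es (i + 1)

theorem length_feaMark (t : List String) : ∀ (i : Nat) (tc : List Bool), (feaMark t i tc).length = tc.length := by
  induction t with
  | nil => intro i tc; simp [feaMark]
  | cons e es ih => intro i tc; simp only [feaMark]; rw [ih]; split <;> simp

theorem getD_set' (l : List Bool) (i j : Nat) (a : Bool) : (l.set i a).getD j false = if j = i ∧ i < l.length then a else l.getD j false := by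
  simp only [List.getD_eq_getElem?_getD, List.getElem?_set]
  by_cases h : i = j
  · subst h
    by_cases hi : i < l.length <;> simp [hi]
  · simp [h]
    intro hji _
    exact absurd hji.symm h

theorem colHit_cons (e : String) (es : List String) (i0 j : Nat) :
    colHit (e :: es) i0 j = ((decide (j = i0) && strNE e) || colHit es (i0 + 1) j) := by
  rcases Nat.lt_trichotomy j i0 with h1 | h1 | h1
  · simp [colHit, Nat.not_le.mpr h1, show ¬ i0 + 1 ≤ j from by omega, show ¬ j = i0 from by omega]
  · subst h1
    simp [colHit, show ¬ j + 1 ≤ j from by omega]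
  · have h2 : j - i0 = (j - (i0 + 1)) + 1 := by omega
    simp [colHit, h2, show i0 ≤ j from by omega, show i0 + 1 ≤ j from by omega,
      show ¬ j = i0 from by omega]

theorem feaMark_getD (t : List String) : ∀ (i0 : Nat) (tc : List Bool) (j : Nat),
    i0 + t.length ≤ tc.length →
    (feaMark t i0 tc).getD j false = (tc.getD j false || colHit t i0 j) := by
  induction t with
  | nil => intro i0 tc j h; simp [feaMark, colHit, strNE, PySem.Str.len]
  | cons e es ih =>
    intro i0 tc j h
    simp only [feaMark]
    have hlen : i0 + 1 + es.length ≤ (if PySem.Str.len e ≠ 0 then tc.set i0 true else tc).length := by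
      simp only [List.length_cons] at h
      split
      · rw [List.length_set]; omega
      · omega
    rw [ih _ _ j hlen, colHit_cons]
    have hi0 : i0 < tc.length := by simp only [List.length_cons] at h; omega
    by_cases he : PySem.Str.len e ≠ 0
    · have hne : strNE e = true := by simpa [strNE] using he
      simp only [if_pos he, getD_set', hne]
      by_cases hj : j = i0 <;> simp [hj, hi0]
    · have he' : e = "" := by simpa using he
      subst he'
      simp [strNE]

theorem foldl_feaMark_getD (rows : List (List String)) : ∀ (tc : List Bool) (j : Nat),
    (∀ t ∈ rows, t.length ≤ tc.length) →
    (rows.foldl (fun tc t => feaMark t 0 tc) tc).getD j false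
      = (tc.getD j false || rows.any (fun t => colHit t 0 j)) := by
  induction rows with
  | nil => intro tc j h; simp
  | cons t ts ih =>
    intro tc j h
    simp only [List.foldl_cons, List.any_cons]
    rw [ih _ j (fun t' ht' => by rw [length_feaMark]; exact h t' (List.mem_cons_of_mem _ ht')),
      feaMark_getD t 0 tc j (by simpa using h t (List.mem_cons_self))]
    cases tc.getD j false <;> simp

theorem feaFill_eq_mRow (tc : List Bool) (t : List String) : ∀ (i : Nat),
    feaFill tc t i = mRow (fun j => tc.getD j false) t i := by
  induction t with
  | nil => intro i; simp [feaFill, mRow]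
  | cons e es ih =>
    intro i
    simp only [feaFill, mRow, ih]
    congr 1
    by_cases he : PySem.Str.len e = 0
    · have he' : e = "" := by simpa using he
      subst he'
      simp [strNE]
    · have he' : ¬ e = "" := by simpa using he
      have hs : strNE e = true := by simpa [strNE] using he
      simp [he', hs]

theorem getD_replicate_false (n j : Nat) : (List.replicate n false).getD j false = false := by
  rcases Nat.lt_or_ge j n with h | h
  · rw [List.getD_replicate _ h]
  · rw [List.getD_eq_getElem?_getD]
    rw [List.getElem?_eq_none (by simpa using h)]
    rfl

theorem colHit_zero (t : List String) (j : Nat) : colHit t 0 j = strNE (t.getD j "") := by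
  simp [colHit]

theorem length_mRowLt (c : Nat → Bool) (m : Nat) (t : List String) : ∀ (i : Nat),
    (mRowLt c m t i).length = t.length := by
  induction t with
  | nil => intro i; simp [mRowLt]
  | cons e es ih => intro i; simp [mRowLt, ih]

theorem mRowLt_of_le (c : Nat → Bool) (m : Nat) (t : List String) : ∀ (i : Nat), m ≤ i →
    mRowLt c m t i = t := by
  induction t with
  | nil => intro i h; rfl
  | cons e es ih =>
    intro i h
    simp [mRowLt, show ¬ i < m from by omega, ih (i + 1) (by omega)]

theorem getD_mRowLt_ge (c : Nat → Bool) (m : Nat) (t : List String) : ∀ (i0 i : Nat), m ≤ i0 + i →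
    (mRowLt c m t i0).getD i "" = t.getD i "" := by
  induction t with
  | nil => intro i0 i h; rfl
  | cons e es ih =>
    intro i0 i h
    cases i with
    | zero => simp [mRowLt, show ¬ i0 < m from by omega]
    | succ k =>
      simp only [mRowLt, List.getD_cons_succ]
      exact ih (i0 + 1) k (by omega)

theorem mRowLt_eq_mRow (c : Nat → Bool) (m : Nat) (t : List String) : ∀ (i0 : Nat),
    i0 + t.length ≤ m → mRowLt c m t i0 = mRow c t i0 := by
  induction t with
  | nil => intro i0 h; rfl
  | cons e es ih =>
    intro i0 h
    simp only [List.length_cons] at h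
    simp only [mRowLt, mRow, show (decide (i0 < m)) = true from by simp; omega, Bool.true_and]
    rw [ih (i0 + 1) (by omega)]

theorem mRowLt_succ (c : Nat → Bool) (m : Nat) (t : List String) : ∀ (i0 : Nat),
    mRowLt c (m + 1) t i0 =
      if (decide (i0 ≤ m) && !strNE (t.getD (m - i0) "") && c m) = true
      then (mRowLt c m t i0).set (m - i0) "\\kern-3pt"
      else mRowLt c m t i0 := by
  induction t with
  | nil => intro i0; simp [mRowLt]
  | cons e es ih =>
    intro i0
    rcases Nat.lt_trichotomy i0 m with h1 | h1 | h1
    · -- i0 < m : head behaves identically under both bounds, set acts in the tail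
      have hm : m - i0 = (m - (i0 + 1)) + 1 := by omega
      simp only [mRowLt, hm, List.getD_cons_succ]
      rw [ih (i0 + 1)]
      simp only [show (decide (i0 ≤ m)) = true from by simp; omega,
        show (decide (i0 + 1 ≤ m)) = true from by simp; omega,
        show (decide (i0 < m + 1)) = true from by simp; omega,
        show (decide (i0 < m)) = true from by simp; omega, Bool.true_and]
      by_cases hP : (!strNE (es.getD (m - (i0 + 1)) "") && c m) = true
      · rw [if_pos hP, if_pos hP, List.set_cons_succ]
      · rw [if_neg hP, if_neg hP]
    · -- i0 = m : the head is the affected cell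
      subst h1
      simp only [mRowLt, Nat.sub_self, List.getD_cons_zero, Nat.le_refl, decide_true,
        Bool.true_and, show (decide (i0 < i0 + 1)) = true from by simp,
        show (decide (i0 < i0)) = false from by simp, Bool.false_and, Bool.true_and]
      rw [mRowLt_of_le c i0 es (i0 + 1) (by omega), mRowLt_of_le c (i0 + 1) es (i0 + 1) (by omega)]
      by_cases hP : (!strNE e && c i0) = true
      · rw [if_pos hP, if_pos hP, List.set_cons_zero]
      · simp [hP]
    · -- m < i0 : both bounds are below every index; nothing changes
      have h2 : decide (i0 ≤ m) = false := by simp; omega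
      rw [mRowLt_of_le c (m + 1) (e :: es) i0 (by omega), mRowLt_of_le c m (e :: es) i0 (by omega)]
      simp [h2]

-- B's column-j non-emptiness test on the partially filled table equals the original column predicate
theorem col_any_eq (c : Nat → Bool) (j : Nat) (ttoc : List (List String)) :
    (((ttoc.map (fun t => mRowLt c j t 0)).filter (fun t => decide (j < t.length))).map
        (fun t => t.getD j "")).any (fun e => PySem.Str.len e != 0)
      = ttoc.any (fun t => strNE (t.getD j "")) := by
  induction ttoc with
  | nil => rfl
  | cons t ts ih =>
    simp only [List.map_cons]
    by_cases h : j < (mRowLt c j t 0).length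
    · rw [List.filter_cons_of_pos (by simpa using h)]
      simp only [List.map_cons, List.any_cons, ih]
      rw [getD_mRowLt_ge c j t 0 j (by omega)]
      rfl
    · rw [List.filter_cons_of_neg (by simpa using h)]
      simp only [List.any_cons, ih]
      rw [length_mRowLt] at h
      have hg : t.getD j "" = "" := by
        rw [List.getD_eq_getElem?_getD, List.getElem?_eq_none (by omega)]
        rfl
      rw [hg]
      simp [strNE, PySem.Str.len]

-- the whole fold advances the fill bound through all of columns j .. j+k-1
theorem fold_inv (c : Nat → Bool) (ttoc : List (List String))
    (hc : ∀ j, c j = ttoc.any (fun t => strNE (t.getD j ""))) :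
    ∀ (k j : Nat),
    (List.range' j k).foldl
      (fun acc i =>
        if ((acc.filter (fun t => decide (i < t.length))).map (fun t => t.getD i "")).any
             (fun e => PySem.Str.len e != 0) then
          acc.map (fun t =>
            if i < t.length ∧ PySem.Str.len (t.getD i "") = 0 then t.set i "\\kern-3pt" else t)
        else acc)
      (ttoc.map (fun t => mRowLt c j t 0))
      = ttoc.map (fun t => mRowLt c (j + k) t 0) := by
  intro k
  induction k with
  | zero => intro j; rfl
  | succ n ih =>
    intro j
    rw [List.range'_succ, List.foldl_cons]
    have hnext : ∀ acc', acc' = ttoc.map (fun t => mRowLt c (j + 1) t 0) →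
        (List.range' (j + 1) n).foldl
          (fun acc i =>
            if ((acc.filter (fun t => decide (i < t.length))).map (fun t => t.getD i "")).any
                 (fun e => PySem.Str.len e != 0) then
              acc.map (fun t =>
                if i < t.length ∧ PySem.Str.len (t.getD i "") = 0 then t.set i "\\kern-3pt" else t)
            else acc)
          acc' = ttoc.map (fun t => mRowLt c (j + (n + 1)) t 0) := by
      intro acc' ha
      subst ha
      have := ih (j + 1)
      rw [show j + 1 + n = j + (n + 1) from by omega] at this
      exact this
    by_cases hany : (((ttoc.map (fun t => mRowLt c j t 0)).filter
          (fun t => decide (j < t.length))).map (fun t => t.getD j "")).any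
            (fun e => PySem.Str.len e != 0) = true
    · -- column j contains a non-empty cell: c j = true and the write pass advances the bound
      have hcj : c j = true := by rw [hc j, ← col_any_eq c j ttoc]; exact hany
      rw [if_pos hany]
      apply hnext
      rw [List.map_map]
      apply List.map_congr_left
      intro t _
      simp only [Function.comp]
      rw [length_mRowLt, getD_mRowLt_ge c j t 0 j (by omega), mRowLt_succ c j t 0,
        show (decide (0 ≤ j) && !strNE (t.getD (j - 0) "") && c j) = !strNE (t.getD j "") from by
          simp [hcj]]
      simp only [Nat.sub_zero]
      by_cases hlt : j < t.length
      · by_cases hz : PySem.Str.len (t.getD j "") = 0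
        · have hg : t.getD j "" = "" := by simpa using hz
          have hs : (!strNE (t.getD j "")) = true := by rw [hg]; simp [strNE, PySem.Str.len]
          rw [if_pos ⟨hlt, hz⟩, if_pos hs]
        · have hs : ¬ (!strNE (t.getD j "")) = true := by
            simp only [strNE, Bool.not_eq_true', Bool.not_eq_false, bne_iff_ne, ne_eq]
            exact hz
          rw [if_neg (fun h => hz h.2), if_neg hs]
      · have hg : t.getD j "" = "" := by
          rw [List.getD_eq_getElem?_getD, List.getElem?_eq_none (by omega)]
          rfl
        have hset : (mRowLt c j t 0).set j "\\kern-3pt" = mRowLt c j t 0 := by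
          apply List.set_eq_of_length_le
          rw [length_mRowLt]; omega
        have hs : (!strNE (t.getD j "")) = true := by rw [hg]; simp [strNE, PySem.Str.len]
        rw [if_neg (fun h => hlt h.1), if_pos hs]
        exact hset.symm
    · -- column j is entirely empty: c j = false, B leaves the table alone, and the bound still advances
      have hcj : c j = false := by
        rw [hc j, ← col_any_eq c j ttoc]
        simpa using hany
      rw [if_neg hany]
      apply hnext
      apply List.map_congr_left
      intro t _
      rw [mRowLt_succ c j t 0, hcj]
      simp

-- A's result as the pointwise model
theorem fillEmpties_eq_model (ttoc : List (List String)) (hpre : Pre_fillEmpties ttoc)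
    (h0 : ttoc.length ≠ 0) :
    fillEmpties ttoc = ttoc.map (fun t => mRow (fun j => ttoc.any (fun t' => strNE (t'.getD j ""))) t 0) := by
  simp only [fillEmpties, if_pos h0]
  set n := (ttoc.headD []).length with hn
  apply List.map_congr_left
  intro t _
  rw [feaFill_eq_mRow]
  have : (fun j => (ttoc.foldl (fun tc t => feaMark t 0 tc) (List.replicate n false)).getD j false)
      = fun j => ttoc.any (fun t' => strNE (t'.getD j "")) := by
    funext j
    rw [foldl_feaMark_getD ttoc (List.replicate n false) j
        (fun t' ht' => by simp only [List.length_replicate]; exact hn ▸ hpre t' ht'),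
      getD_replicate_false]
    simp only [Bool.false_or]
    exact congrArg ttoc.any (funext fun t' => colHit_zero t' j)
  rw [this]

theorem fillEmpties_eq (ttoc : List (List String)) (hpre : Pre_fillEmpties ttoc) :
    fillEmpties ttoc = fillEmpties_alt ttoc := by
  by_cases h0 : ttoc = []
  · subst h0; rfl
  · have hlen : ttoc.length ≠ 0 := by simpa using h0
    set c : Nat → Bool := fun j => ttoc.any (fun t => strNE (t.getD j "")) with hcdef
    have hc : ∀ j, c j = ttoc.any (fun t => strNE (t.getD j "")) := fun j => rfl
    rw [fillEmpties_eq_model ttoc hpre hlen]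
    simp only [fillEmpties_alt, if_neg h0, List.range_eq_range']
    have hstart : ttoc.map (fun t => mRowLt c 0 t 0) = ttoc := by
      rw [List.map_congr_left (fun t (_ : t ∈ ttoc) => mRowLt_of_le c 0 t 0 (Nat.le_refl 0))]
      simp
    have key := fold_inv c ttoc hc (ttoc.headD []).length 0
    rw [hstart] at key
    rw [key]
    apply List.map_congr_left
    intro t ht
    rw [mRowLt_eq_mRow c _ t 0 (by simpa using hpre t ht)]

-- ===== VERDICT (by name: the statement is the Claim_ definition above) =====
theorem fillEmpties_spec : Claim_equal_fillEmpties := by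
  intro ttoc _ hpre
  unfold Spec_fillEmpties
  exact fillEmpties_eq ttoc hpre
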